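-- pv_equiv track=rewrite | github.com/cherninkiy/rawllm | core/agents/recommender.py | optimize_committee_composition
-- ===== SOURCE A (Python) =====
-- from typing import Any
--
-- def optimize_committee_composition(
--
--     candidate_agents: list[dict[str, Any]],
-- ) -> list[dict[str, Any]]:
--     # Encourage task-type diversity while keeping high-ranked agents first.
--     chosen: list[dict[str, Any]] = []
--     seen_task_types: set[str] = set()
--     for agent in candidate_agents:
--         task_type = str(agent.get("task_type", "general"))
--         if task_type not in seen_task_types:
--             chosen.append(agent)
--             seen_task_types.add(task_type)
--
--     # Add remaining candidates to fill committee capacity.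
--     for agent in candidate_agents:
--         if agent not in chosen:
--             chosen.append(agent)
--     return chosen
-- ===== SOURCE B (Python) =====
-- from typing import Any
--
--
-- def optimize_committee_composition(
--     candidate_agents: list[dict[str, Any]],
-- ) -> list[dict[str, Any]]:
--     # Single pass with two accumulators: route each agent either to the
--     # diversity list (first agent of a newly-seen task_type) or to the
--     # overflow list (if not already value-present in either); concatenate.
--     seen_task_types: set[str] = set()
--     diverse: list[dict[str, Any]] = []
--     rest: list[dict[str, Any]] = []
--     for agent in candidate_agents:
--         task_type = str(agent.get("task_type", "general"))
--         if task_type not in seen_task_types: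
--             seen_task_types.add(task_type)
--             diverse.append(agent)
--         elif agent not in diverse and agent not in rest:
--             rest.append(agent)
--     return diverse + rest
-- ===== Notes on version B (the rewrite author's own statement) =====
-- stated objective: alternative
-- what changed: A's two staged passes (build the diversity list, then re-scan all candidates filling from it) are replaced by a single pass with two accumulators that routes each agent on sight either to the diversity list (new task_type) or to an overflow list (if not value-present in either), returning their concatenation.
import Mathlib
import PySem

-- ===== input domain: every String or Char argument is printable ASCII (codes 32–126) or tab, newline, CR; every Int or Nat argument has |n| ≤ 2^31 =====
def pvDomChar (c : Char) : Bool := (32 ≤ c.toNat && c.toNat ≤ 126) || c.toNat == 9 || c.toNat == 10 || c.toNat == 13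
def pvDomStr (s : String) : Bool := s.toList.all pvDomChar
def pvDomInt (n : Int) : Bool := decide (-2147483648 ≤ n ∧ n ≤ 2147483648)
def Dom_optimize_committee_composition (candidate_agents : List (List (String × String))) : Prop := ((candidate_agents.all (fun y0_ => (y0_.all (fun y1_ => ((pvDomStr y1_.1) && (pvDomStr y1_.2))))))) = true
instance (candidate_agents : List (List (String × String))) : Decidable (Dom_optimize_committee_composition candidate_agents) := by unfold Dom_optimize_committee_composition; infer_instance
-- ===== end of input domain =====

-- B replaces A's two staged passes by ONE pass with two accumulators (diverse/rest),
-- routing each agent as it is scanned; same values, alternative decomposition.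

-- Shared Python-semantics helpers (language primitives, not algorithm):
-- agent.get("task_type", "general")  — first-match association-list lookup with default
def pvTaskType (a : List (String × String)) : String :=
  match a.find? (fun p => p.1 == "task_type") with
  | some p => p.2
  | none => "general"

-- Python dict equality (mapping equality: same keys, same value at each key)
def pvDictEq (a b : List (String × String)) : Bool :=
  (a.all (fun p => (b.find? (fun q => q.1 == p.1)).map Prod.snd == some p.2)) &&
  (b.all (fun p => (a.find? (fun q => q.1 == p.1)).map Prod.snd == some p.2))

-- Python 'agent in <list of dicts>'
def pvDictMem (x : List (String × String)) (ys : List (List (String × String))) : Bool :=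
  ys.any (fun y => pvDictEq x y)

-- ===== PORT A =====
-- A's first loop: (chosen, seen_task_types) after scanning the list
def pvPhase1Step (st : List (List (String × String)) × PySem.Set String)
    (agent : List (String × String)) : List (List (String × String)) × PySem.Set String :=
  let task_type := pvTaskType agent
  if PySem.Set.contains st.2 task_type then st
  else (st.1 ++ [agent], PySem.Set.add st.2 task_type)

def optimize_committee_composition (candidate_agents : List (List (String × String))) : List (List (String × String)) :=
  let st := candidate_agents.foldl pvPhase1Step ([], PySem.Set.empty)
  -- second loop: append each candidate not already (value-)present in chosen
  candidate_agents.foldl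
    (fun chosen agent => if pvDictMem agent chosen then chosen else chosen ++ [agent]) st.1

-- ===== PORT B =====
-- B's single-pass step on state (diverse, rest, seen_task_types)
def pvAltStep (st : List (List (String × String)) × List (List (String × String)) × PySem.Set String)
    (agent : List (String × String)) :
    List (List (String × String)) × List (List (String × String)) × PySem.Set String :=
  let task_type := pvTaskType agent
  if !(PySem.Set.contains st.2.2 task_type) then
    (st.1 ++ [agent], st.2.1, PySem.Set.add st.2.2 task_type)
  else if !(pvDictMem agent st.1) && !(pvDictMem agent st.2.1) then
    (st.1, st.2.1 ++ [agent], st.2.2)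
  else st

def optimize_committee_composition_alt (candidate_agents : List (List (String × String))) : List (List (String × String)) :=
  let st := candidate_agents.foldl pvAltStep ([], [], PySem.Set.empty)
  st.1 ++ st.2.1

-- ===== PRECONDITION & SPEC =====
-- Pre_ requires each agent's keys to be duplicate-free: exactly the association lists
-- that represent Python dicts (a Python dict can never hold a duplicate key).
def Pre_optimize_committee_composition (candidate_agents : List (List (String × String))) : Prop :=
  ∀ a ∈ candidate_agents, (a.map Prod.fst).Nodup
instance (candidate_agents : List (List (String × String))) : Decidable (Pre_optimize_committee_composition candidate_agents) := by unfold Pre_optimize_committee_composition; infer_instance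
def pvWitness_optimize_committee_composition : (List (List (String × String))) :=
  [[("task_type", "code"), ("name", "a")], [("task_type", "code"), ("name", "b")], [("name", "c")]]

def Spec_optimize_committee_composition (candidate_agents : List (List (String × String))) (out : List (List (String × String))) : Prop := out = optimize_committee_composition_alt candidate_agents
instance (candidate_agents : List (List (String × String))) (out : List (List (String × String))) : Decidable (Spec_optimize_committee_composition candidate_agents out) := by unfold Spec_optimize_committee_composition; infer_instance

-- ===== CLAIM (what is proved, stated in full; the proofs are below) =====
def Claim_equal_optimize_committee_composition : Prop := ∀ (candidate_agents : List (List (String × String))), Dom_optimize_committee_composition candidate_agents → Pre_optimize_committee_composition candidate_agents → Spec_optimize_committee_composition candidate_agents (optimize_committee_composition candidate_agents)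

-- ===== LEMMAS AND PROOFS =====

-- with duplicate-free keys, find? by a member's key returns that member
theorem pvFind_self {l : List (String × String)} {p : String × String}
    (hn : (l.map Prod.fst).Nodup) (hm : p ∈ l) :
    l.find? (fun q => q.1 == p.1) = some p := by
  induction l with
  | nil => simp at hm
  | cons h t ih =>
    simp only [List.map_cons, List.nodup_cons] at hn
    rcases List.mem_cons.mp hm with rfl | hmt
    · exact List.find?_cons_of_pos (by simp)
    · have hne : ¬ ((fun q : String × String => q.1 == p.1) h) = true := by
        intro he
        exact hn.1 (by
          have : h.1 = p.1 := by simpa using he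
          rw [this]; exact List.mem_map.mpr ⟨p, hmt, rfl⟩)
      rw [List.find?_cons_of_neg (by exact hne)]
      exact ih hn.2 hmt

theorem pvDictEq_refl {a : List (String × String)} (hn : (a.map Prod.fst).Nodup) :
    pvDictEq a a = true := by
  simp only [pvDictEq, Bool.and_eq_true, List.all_eq_true]
  constructor <;> (intro p hp; rw [pvFind_self hn hp]; simp)

-- equal-as-mappings dicts have the same task_type
theorem pvDictEq_taskType {a b : List (String × String)} (h : pvDictEq a b = true) :
    pvTaskType a = pvTaskType b := by
  simp only [pvDictEq, Bool.and_eq_true, List.all_eq_true] at h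
  obtain ⟨ha, hb⟩ := h
  unfold pvTaskType
  cases hfa : a.find? (fun p => p.1 == "task_type") with
  | some p =>
      have hp := List.find?_some hfa
      have hmem := List.mem_of_find?_eq_some hfa
      have hk : p.1 = "task_type" := by simpa using hp
      have := ha p hmem
      rw [hk] at this
      cases hfb : b.find? (fun q => q.1 == "task_type") with
      | some q => simp [hfb] at this; simp [this]
      | none => simp [hfb] at this
  | none =>
      cases hfb : b.find? (fun q => q.1 == "task_type") with
      | some q =>
          have hq := List.find?_some hfb
          have hmem := List.mem_of_find?_eq_some hfb
          have hk : q.1 = "task_type" := by simpa using hq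
          have := hb q hmem
          rw [hk, hfa] at this
          simp at this
      | none => rfl

-- contains is antitone along Set.add
theorem pvContains_add_false {s : PySem.Set String} {t y : String}
    (h : PySem.Set.contains (PySem.Set.add s t) y = false) :
    PySem.Set.contains s y = false := by
  simp [PySem.Set.contains, PySem.Set.add] at *
  intro hy; split at h <;> simp_all

-- phase 1 only appends, and everything it appends has a task_type not in the starting seen-set
theorem pvPhase1_ext (l : List (List (String × String)))
    (d : List (List (String × String))) (s : PySem.Set String) :
    ∃ e, (l.foldl pvPhase1Step (d, s)).1 = d ++ e ∧
      ∀ a ∈ e, PySem.Set.contains s (pvTaskType a) = false := by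
  induction l generalizing d s with
  | nil => exact ⟨[], by simp⟩
  | cons x l ih =>
    simp only [List.foldl_cons]
    by_cases hc : PySem.Set.contains s (pvTaskType x) = true
    · rw [pvPhase1Step, if_pos hc]; exact ih d s
    · rw [pvPhase1Step, if_neg hc]
      obtain ⟨e, he, hs⟩ := ih (d ++ [x]) (PySem.Set.add s (pvTaskType x))
      refine ⟨x :: e, by simpa using he, ?_⟩
      intro a ha
      rcases List.mem_cons.mp ha with rfl | hae
      · simpa using hc
      · exact pvContains_add_false (hs a hae)

-- B's diverse/seen components evolve exactly as A's phase-1 state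
theorem pvAlt_proj (l : List (List (String × String)))
    (d r : List (List (String × String))) (s : PySem.Set String) :
    ((l.foldl pvAltStep (d, r, s)).1, (l.foldl pvAltStep (d, r, s)).2.2)
      = l.foldl pvPhase1Step (d, s) := by
  induction l generalizing d r s with
  | nil => rfl
  | cons x l ih =>
    simp only [List.foldl_cons]
    by_cases hc : PySem.Set.contains s (pvTaskType x) = true
    · rw [pvAltStep, pvPhase1Step]
      simp only [hc, Bool.not_true, if_pos]
      by_cases hm : (!(pvDictMem x d) && !(pvDictMem x r)) = true
      · rw [if_pos hm]; exact ih d (r ++ [x]) s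
      · rw [if_neg hm]; exact ih d r s
    · rw [pvAltStep, pvPhase1Step, if_neg hc]
      have : (!(PySem.Set.contains s (pvTaskType x))) = true := by
        simp at hc ⊢; exact hc
      rw [if_pos this]
      exact ih (d ++ [x]) r (PySem.Set.add s (pvTaskType x))

-- main invariant: A's fill loop from the final diversity list equals that list ++ B's rest
theorem pvMain (l : List (List (String × String)))
    (d r : List (List (String × String))) (s : PySem.Set String)
    (hnod : ∀ a ∈ l, (a.map Prod.fst).Nodup) :
    l.foldl (fun chosen agent => if pvDictMem agent chosen then chosen else chosen ++ [agent])
        ((l.foldl pvPhase1Step (d, s)).1 ++ r)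
      = (l.foldl pvPhase1Step (d, s)).1 ++ (l.foldl pvAltStep (d, r, s)).2.1 := by
  induction l generalizing d r s with
  | nil => rfl
  | cons x l ih =>
    simp only [List.foldl_cons]
    have hnx : (x.map Prod.fst).Nodup := hnod x (by simp)
    have hnod' : ∀ a ∈ l, (a.map Prod.fst).Nodup := fun a ha => hnod a (by simp [ha])
    by_cases hc : PySem.Set.contains s (pvTaskType x) = true
    · -- x's task_type already seen: phase-1 state unchanged
      rw [pvPhase1Step, if_pos hc, pvAltStep]
      simp only [hc, Bool.not_true, Bool.false_eq_true, if_false]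
      obtain ⟨e, he, hs⟩ := pvPhase1_ext l d s
      have hmem_e : pvDictMem x e = false := by
        simp only [pvDictMem, List.any_eq_false]
        intro a ha heq
        have ht := hs a ha
        rw [← pvDictEq_taskType heq] at ht
        rw [ht] at hc
        simp at hc
      have hmem : pvDictMem x ((l.foldl pvPhase1Step (d, s)).1 ++ r)
          = (pvDictMem x d || pvDictMem x r) := by
        rw [he]
        simp only [pvDictMem, List.any_append]
        simp only [pvDictMem] at hmem_e
        rw [hmem_e]
        simp
      by_cases hm : (pvDictMem x d || pvDictMem x r) = true
      · rw [hmem, if_pos hm]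
        have hbf : (!(pvDictMem x d) && !(pvDictMem x r)) = false := by
          rcases Bool.or_eq_true_iff.mp hm with h | h <;> simp [h]
        rw [if_neg (by simp [hbf])]
        exact ih d r s hnod'
      · rw [hmem, if_neg hm]
        have hm' : (!(pvDictMem x d) && !(pvDictMem x r)) = true := by
          cases hdx : pvDictMem x d <;> cases hrx : pvDictMem x r <;> simp_all
        rw [if_pos hm']
        have := ih d (r ++ [x]) s hnod'
        rw [← List.append_assoc] at this
        exact this
    · -- x's task_type is new: x joins the diversity list
      rw [pvPhase1Step, if_neg hc, pvAltStep]
      have hbc : (!(PySem.Set.contains s (pvTaskType x))) = true := by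
        simp at hc ⊢; exact hc
      rw [if_pos hbc]
      obtain ⟨e, he, _⟩ := pvPhase1_ext l (d ++ [x]) (PySem.Set.add s (pvTaskType x))
      have hmem : pvDictMem x ((l.foldl pvPhase1Step (d ++ [x], PySem.Set.add s (pvTaskType x))).1 ++ r) = true := by
        simp only [pvDictMem, List.any_eq_true]
        exact ⟨x, by rw [he]; simp, pvDictEq_refl hnx⟩
      rw [hmem, if_pos rfl]
      exact ih (d ++ [x]) r (PySem.Set.add s (pvTaskType x)) hnod'

-- ===== VERDICT (by name: the statement is the Claim_ definition above) =====
theorem optimize_committee_composition_spec : Claim_equal_optimize_committee_composition := by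
  intro candidate_agents _ hpre
  unfold Spec_optimize_committee_composition
  unfold optimize_committee_composition optimize_committee_composition_alt
  have hproj := pvAlt_proj candidate_agents [] [] PySem.Set.empty
  have hd : (candidate_agents.foldl pvAltStep ([], [], PySem.Set.empty)).1
      = (candidate_agents.foldl pvPhase1Step ([], PySem.Set.empty)).1 := by
    rw [← hproj]
  simp only []
  rw [hd]
  have := pvMain candidate_agents [] [] PySem.Set.empty hpre
  simpa using this
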